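-- pv_equiv track=rewrite | github.com/tejraj-pawar/Python_Programming | chapter_06-29.py | sumOfDoubleEvenPlace
-- ===== SOURCE A (Python) =====
-- def getDigit(number):
--     if number <= 9:
--         return number
--     else:
--         sum = 0
--         while(number > 0):
--             sum += number % 10
--             number //= 10
--         return sum
--
-- def sumOfDoubleEvenPlace(number):
--     numList = [int(num) for num in str(number)]
--     numList = [i * 2 for i in numList]
--
--     sum = 0
--     for i in range(len(numList) - 2, -1, -2):
--         num = numList[i]
--         if num <= 9:
--             sum += num
--         else:
--             sum += getDigit(num)
--
--     return sum
-- ===== SOURCE B (Python) =====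
-- def sumOfDoubleEvenPlace(number):
--     pos = 0
--     total = 0
--     for ch in reversed(str(number)):
--         if pos % 2 == 1:
--             d2 = int(ch) * 2
--             total += d2 - 9 if d2 > 9 else d2
--         pos += 1
--     return total
-- ===== Notes on version B (the rewrite author's own statement) =====
-- stated objective: simpler
-- what changed: B replaces A's digit-list building, backward index loop and the getDigit digit-sum helper with a single pass over the reversed digit string that collapses each doubled odd-position digit via the closed form d2 - 9 if d2 > 9 else d2.
import Mathlib
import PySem

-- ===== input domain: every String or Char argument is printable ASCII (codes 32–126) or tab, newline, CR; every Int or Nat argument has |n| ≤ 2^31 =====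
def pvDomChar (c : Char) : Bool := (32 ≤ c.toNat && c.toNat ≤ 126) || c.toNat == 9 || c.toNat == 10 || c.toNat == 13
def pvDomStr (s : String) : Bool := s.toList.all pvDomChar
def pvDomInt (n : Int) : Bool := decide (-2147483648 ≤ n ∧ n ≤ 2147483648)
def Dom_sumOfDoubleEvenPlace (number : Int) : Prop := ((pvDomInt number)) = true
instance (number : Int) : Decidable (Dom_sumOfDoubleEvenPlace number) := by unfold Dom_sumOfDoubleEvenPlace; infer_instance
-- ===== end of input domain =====

-- B replaces A's digit-list building, backward index loop and the getDigit digit-sum helper with a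
-- single pass over the reversed digit string, collapsing each doubled odd-position digit with the
-- closed form d2 - 9 if d2 > 9 else d2 (objective: simpler).

-- int(ch) for a one-character string ch (exact: PySem.Int.ofChars?; shared by both ports; the
-- .getD 0 total form is justified by Pre_: for 0 ≤ number every character of str(number) is a digit)
def pyIntChar (c : Char) : Int := (PySem.Int.ofChars? [c]).getD 0

-- ===== PORT A =====
-- the while-loop of getDigit
def getDigitLoop (number sum : Int) : Int :=
  if 0 < number then
    getDigitLoop (PySem.Int.floordiv number 10) (sum + PySem.Int.mod number 10)
  else sum
termination_by number.toNat
decreasing_by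
  rw [PySem.Int.floordiv_eq_ediv_of_pos (by norm_num)]
  omega

def getDigit (number : Int) : Int :=
  if number ≤ 9 then number else getDigitLoop number 0

def sumOfDoubleEvenPlace (number : Int) : Int :=
  let numList := (PySem.Int.toStr number).toList.map (fun num => pyIntChar num)
  let numList2 := numList.map (fun i => i * 2)
  (PySem.List.pyRange (PySem.List.len numList2 - 2) (-1) (-2)).foldl
    (fun sum i =>
      let num := PySem.List.pyGetD numList2 i 0
      if num ≤ 9 then sum + num else sum + getDigit num) 0

-- ===== PORT B =====
def sumOfDoubleEvenPlace_alt (number : Int) : Int :=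
  ((PySem.Int.toStr number).toList.reverse.foldl
    (fun (st : Int × Int) ch =>
      if PySem.Int.mod st.1 2 == 1 then
        let d2 := pyIntChar ch * 2
        (st.1 + 1, st.2 + (if d2 > 9 then d2 - 9 else d2))
      else (st.1 + 1, st.2)) (0, 0)).2

-- ===== PRECONDITION & SPEC =====
-- Pre_ excludes negative numbers: str(number) then contains '-', on which int(ch) raises ValueError in A.
def Pre_sumOfDoubleEvenPlace (number : Int) : Prop := 0 ≤ number
instance (number : Int) : Decidable (Pre_sumOfDoubleEvenPlace number) := by unfold Pre_sumOfDoubleEvenPlace; infer_instance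
def pvWitness_sumOfDoubleEvenPlace : Int := 12345

def Spec_sumOfDoubleEvenPlace (number : Int) (out : Int) : Prop := out = sumOfDoubleEvenPlace_alt number
instance (number : Int) (out : Int) : Decidable (Spec_sumOfDoubleEvenPlace number out) := by unfold Spec_sumOfDoubleEvenPlace; infer_instance

-- ===== CLAIM (what is proved, stated in full; the proofs are below) =====
def Claim_equal_sumOfDoubleEvenPlace : Prop := ∀ (number : Int), Dom_sumOfDoubleEvenPlace number → Pre_sumOfDoubleEvenPlace number → Spec_sumOfDoubleEvenPlace number (sumOfDoubleEvenPlace number)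

-- ===== LEMMAS AND PROOFS =====

-- the ten decimal digit characters
def digitChars : List Char := ['0','1','2','3','4','5','6','7','8','9']

theorem digitChar_mem_digitChars (n : Nat) (h : n < 10) : n.digitChar ∈ digitChars := by
  interval_cases n <;> decide

theorem toDigitsCore_mem (f : Nat) : ∀ (n : Nat) (l : List Char),
    (∀ c ∈ l, c ∈ digitChars) → ∀ c ∈ Nat.toDigitsCore 10 f n l, c ∈ digitChars := by
  induction f with
  | zero => intro n l hl c hc; exact hl c hc
  | succ f ih =>
    intro n l hl c hc
    rw [Nat.toDigitsCore] at hc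
    by_cases h : n / 10 = 0
    · simp only [h, if_true] at hc
      rcases List.mem_cons.mp hc with h' | h'
      · exact h' ▸ digitChar_mem_digitChars _ (Nat.mod_lt _ (by norm_num))
      · exact hl c h'
    · simp only [h, if_false] at hc
      refine ih _ _ ?_ c hc
      intro c' hc'
      rcases List.mem_cons.mp hc' with h' | h'
      · exact h' ▸ digitChar_mem_digitChars _ (Nat.mod_lt _ (by norm_num))
      · exact hl c' h'

theorem toDigits_mem (m : Nat) : ∀ c ∈ Nat.toDigits 10 m, c ∈ digitChars :=
  toDigitsCore_mem (m + 1) m [] (by simp)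

theorem pyIntChar_bound {c : Char} (h : c ∈ digitChars) :
    0 ≤ pyIntChar c ∧ pyIntChar c ≤ 9 := by
  fin_cases h <;> decide

-- A's doubled-digit collapse (branch of its loop body) agrees with B's closed form on digits
theorem step_eq (v : Int) (h0 : 0 ≤ v) (h9 : v ≤ 9) :
    (if v * 2 ≤ 9 then v * 2 else getDigit (v * 2)) = (if v * 2 > 9 then v * 2 - 9 else v * 2) := by
  interval_cases v <;> simp [getDigit, getDigitLoop, PySem.Int.floordiv, PySem.Int.mod]

-- B's loop body, named
def bstep (st : Int × Int) (ch : Char) : Int × Int :=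
  if PySem.Int.mod st.1 2 == 1 then
    (st.1 + 1, st.2 + (if pyIntChar ch * 2 > 9 then pyIntChar ch * 2 - 9 else pyIntChar ch * 2))
  else (st.1 + 1, st.2)

-- the right-to-left two-at-a-time sum both programs compute (input: the reversed digit characters)
def evensumC : List Char → Int
  | [] => 0
  | [_] => 0
  | _ :: d :: r =>
      (if pyIntChar d * 2 > 9 then pyIntChar d * 2 - 9 else pyIntChar d * 2) + evensumC r

theorem lemB : ∀ (l : List Char) (p t : Int), 0 ≤ p → PySem.Int.mod p 2 = 0 →
    (l.foldl bstep (p, t)).2 = t + evensumC l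
  | [], p, t, _, _ => by simp [evensumC]
  | [c], p, t, hp, hm => by
      simp only [List.foldl_cons, List.foldl_nil, bstep, hm, evensumC]
      norm_num
  | c :: d :: r, p, t, hp, hm => by
      have hmod := PySem.Int.mod_eq_emod_of_pos (a := p) (b := 2) (by norm_num)
      have hm2 : PySem.Int.mod (p + 2) 2 = 0 := by
        rw [PySem.Int.mod_eq_emod_of_pos (by norm_num)]
        rw [hmod] at hm
        omega
      have ih := lemB r (p + 2)
        (t + (if pyIntChar d * 2 > 9 then pyIntChar d * 2 - 9 else pyIntChar d * 2)) (by omega) hm2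
      have e1 : (p + 1) % 2 = 1 := by rw [hmod] at hm; omega
      simp only [List.foldl_cons, bstep, hm] at ih ⊢
      norm_num at ih ⊢
      rw [show p + 1 + 1 = p + 2 from by ring, if_pos e1, ih, evensumC]
      ring

theorem pyRange_neg_two_cons (m : Nat) :
    PySem.List.pyRange (m : Int) (-1) (-2) = (m : Int) :: PySem.List.pyRange ((m : Int) - 2) (-1) (-2) := by
  simp only [PySem.List.pyRange, if_neg (show (-2:Int) ≠ 0 by norm_num),
    if_neg (show ¬ (0:Int) < -2 by norm_num)]
  rw [if_pos (show (-1:Int) < (m:Int) by omega)]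
  have hL : (((m:Int) - -1 + - -2 - 1) / - -2).toNat = m / 2 + 1 := by
    have h1 : ((m:Int) - -1 + - -2 - 1) / - -2 = ((m + 2 : Nat) : Int) / ((2 : Nat) : Int) := by
      push_cast; ring_nf
    rw [h1, ← Int.natCast_div, Int.toNat_natCast]
    omega
  by_cases hm : 2 ≤ m
  · rw [if_pos (show (-1:Int) < (m:Int) - 2 by omega)]
    have hR : (((m:Int) - 2 - -1 + - -2 - 1) / - -2).toNat = m / 2 := by
      have h1 : ((m:Int) - 2 - -1 + - -2 - 1) / - -2 = (((m - 2) + 2 : Nat) : Int) / ((2 : Nat) : Int) := by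
        push_cast [hm]
        congr 1
        ring
      rw [h1, ← Int.natCast_div, Int.toNat_natCast]
      omega
    rw [hL, hR, List.range_succ_eq_map]
    simp only [List.map_cons, List.map_map, Nat.cast_zero]
    rw [List.cons_eq_cons]
    refine ⟨by ring, List.map_congr_left ?_⟩
    intro k _
    simp only [Function.comp_apply]
    push_cast
    ring
  · rw [hL]
    interval_cases m <;> decide

theorem mem_pyRange_neg_two {a i : Int} (h : i ∈ PySem.List.pyRange a (-1) (-2)) : 0 ≤ i ∧ i ≤ a := by
  simp only [PySem.List.pyRange, if_neg (show (-2:Int) ≠ 0 by norm_num),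
    if_neg (show ¬ (0:Int) < -2 by norm_num)] at h
  by_cases ha : (-1 : Int) < a
  · rw [if_pos ha] at h
    obtain ⟨k, hk, rfl⟩ := List.mem_map.mp h
    have hk' := List.mem_range.mp hk
    have hkc := Int.lt_toNat.mp hk'
    rw [show (- -2 : Int) = 2 from by norm_num,
        show a - -1 + 2 - 1 = a + 2 from by ring] at hkc
    have h2 : ((k : Int) + 1) * 2 ≤ a + 2 :=
      (Int.le_ediv_iff_mul_le (by norm_num)).mp (by omega)
    constructor <;> omega
  · rw [if_neg ha] at h
    simp at h

-- A's loop body branch, as a single function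
def stepA (x : Int) : Int := if x ≤ 9 then x else getDigit x

-- A's doubled digit list
def dbl (cs : List Char) : List Int := (cs.map pyIntChar).map (fun i => i * 2)

-- A's whole loop, named
def aFold (cs : List Char) : Int :=
  (PySem.List.pyRange (PySem.List.len (dbl cs) - 2) (-1) (-2)).foldl
    (fun sum i =>
      if PySem.List.pyGetD (dbl cs) i 0 ≤ 9 then sum + PySem.List.pyGetD (dbl cs) i 0
      else sum + getDigit (PySem.List.pyGetD (dbl cs) i 0)) 0

theorem aFold_sum (cs : List Char) :
    aFold cs = ((PySem.List.pyRange (PySem.List.len (dbl cs) - 2) (-1) (-2)).map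
      (fun i => stepA (PySem.List.pyGetD (dbl cs) i 0))).sum := by
  unfold aFold
  rw [PySem.List.foldl_congr_mem _ _
    (fun sum i => sum + stepA (PySem.List.pyGetD (dbl cs) i 0)) 0
    (by intro acc x _; by_cases hc : PySem.List.pyGetD (dbl cs) x 0 ≤ 9 <;> simp [stepA, hc])]
  rw [PySem.List.foldl_add]
  simp

theorem lemA : ∀ (rl : List Char), (∀ c' ∈ rl, 0 ≤ pyIntChar c' ∧ pyIntChar c' ≤ 9) →
    aFold rl.reverse = evensumC rl
  | [], _ => by decide
  | [c], _ => by
      have h1 : PySem.List.pyRange ((-1 : Int)) (-1) (-2) = [] := by decide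
      simp [aFold, dbl, evensumC, PySem.List.len_eq]
      rw [h1]
      rfl
  | c :: d :: r, h => by
      have hd := h d (by simp)
      have ih := lemA r (fun c' hc' => h c' (by simp [hc']))
      have hrev : (c :: d :: r).reverse = r.reverse ++ [d, c] := by simp
      rw [hrev]
      have hdbl : dbl (r.reverse ++ [d, c]) = dbl r.reverse ++ [pyIntChar d * 2, pyIntChar c * 2] := by
        simp [dbl]
      have hlenR : (dbl r.reverse).length = r.length := by simp [dbl]
      have hlen : PySem.List.len (dbl (r.reverse ++ [d, c])) - 2 = (r.length : Int) := by
        rw [PySem.List.len_eq, hdbl]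
        simp only [List.length_append, hlenR, List.length_cons, List.length_nil]
        push_cast
        ring
      rw [aFold_sum, hlen, pyRange_neg_two_cons r.length, List.map_cons, List.sum_cons]
      have hhead : PySem.List.pyGetD (dbl (r.reverse ++ [d, c])) (r.length : Int) 0 = pyIntChar d * 2 := by
        rw [PySem.List.pyGetD_natCast, hdbl,
          List.getD_append_right _ _ _ _ (le_of_eq hlenR)]
        simp [hlenR]
      have htail : ((PySem.List.pyRange ((r.length : Int) - 2) (-1) (-2)).map
            (fun i => stepA (PySem.List.pyGetD (dbl (r.reverse ++ [d, c])) i 0))).sum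
          = ((PySem.List.pyRange ((r.length : Int) - 2) (-1) (-2)).map
            (fun i => stepA (PySem.List.pyGetD (dbl r.reverse) i 0))).sum := by
        congr 1
        apply List.map_congr_left
        intro x hx
        obtain ⟨hx0, hx1⟩ := mem_pyRange_neg_two hx
        obtain ⟨k, rfl⟩ : ∃ k : Nat, x = (k : Int) := ⟨x.toNat, (Int.toNat_of_nonneg hx0).symm⟩
        have hk : k < (dbl r.reverse).length := by rw [hlenR]; omega
        rw [PySem.List.pyGetD_natCast, PySem.List.pyGetD_natCast, hdbl,
          List.getD_append _ _ _ _ hk]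
      rw [hhead, htail]
      have ihs : ((PySem.List.pyRange ((r.length : Int) - 2) (-1) (-2)).map
            (fun i => stepA (PySem.List.pyGetD (dbl r.reverse) i 0))).sum = evensumC r := by
        rw [← ih, aFold_sum]
        have : PySem.List.len (dbl r.reverse) - 2 = (r.length : Int) - 2 := by
          rw [PySem.List.len_eq, hlenR]
        rw [this]
      rw [ihs, evensumC]
      have hs := step_eq (pyIntChar d) hd.1 hd.2
      unfold stepA
      rw [hs]

-- ===== VERDICT (by name: the statement is the Claim_ definition above) =====
theorem sumOfDoubleEvenPlace_spec : Claim_equal_sumOfDoubleEvenPlace := by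
  unfold Claim_equal_sumOfDoubleEvenPlace
  intro number _ hpre
  unfold Pre_sumOfDoubleEvenPlace at hpre
  unfold Spec_sumOfDoubleEvenPlace
  have hmem : ∀ c ∈ (PySem.Int.toStr number).toList, c ∈ digitChars := by
    intro c hc
    rw [PySem.Int.toList_toStr] at hc
    rw [PySem.Int.toChars, if_neg (by omega)] at hc
    exact toDigits_mem _ c hc
  have hbound : ∀ c ∈ (PySem.Int.toStr number).toList.reverse,
      0 ≤ pyIntChar c ∧ pyIntChar c ≤ 9 :=
    fun c hc => pyIntChar_bound (hmem c (List.mem_reverse.mp hc))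
  have hA : sumOfDoubleEvenPlace number = aFold (PySem.Int.toStr number).toList := rfl
  have hB : sumOfDoubleEvenPlace_alt number
      = ((PySem.Int.toStr number).toList.reverse.foldl bstep (0, 0)).2 := rfl
  rw [hA, hB, lemB _ 0 0 le_rfl (by decide)]
  have h := lemA (PySem.Int.toStr number).toList.reverse hbound
  rw [List.reverse_reverse] at h
  rw [h]
  ring
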